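-- pv_equiv track=rewrite | github.com/senuravihanjayadeva/iit_research_project_msc | backend/main.py | map_categories_to_diseases
-- ===== SOURCE A (Python) =====
-- def map_categories_to_diseases(category_ids, selected_category_id):
--     disease_map = {
--         0: "Healthy Tooth",
--         1: "Cavity",
--         2: "Fillings",
--         3: "Impacted Tooth",
--         4: "Implant",
--         5: "Infected-teeth"
--     }
--
--     # Filter only category_ids that match the selected one
--     filtered_ids = [int(cat) for cat in category_ids if int(cat) == selected_category_id]
--
--     # Map to disease names
--     diseases = [disease_map.get(cat, "Unknown") for cat in filtered_ids]
--     return diseases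
-- ===== SOURCE B (Python) =====
-- def map_categories_to_diseases(category_ids, selected_category_id):
--     disease_map = {
--         0: "Healthy Tooth",
--         1: "Cavity",
--         2: "Fillings",
--         3: "Impacted Tooth",
--         4: "Implant",
--         5: "Infected-teeth"
--     }
--     count = category_ids.count(selected_category_id)
--     return [disease_map.get(selected_category_id, "Unknown")] * count
-- ===== Notes on version B (the rewrite author's own statement) =====
-- stated objective: simpler
-- what changed: Every filtered id equals selected_category_id, so B replaces A's filter-then-map pair of comprehensions with one count of matches and replicates the single looked-up disease name that many times (no intermediate filtered list, one dict lookup instead of one per match).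
import Mathlib
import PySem

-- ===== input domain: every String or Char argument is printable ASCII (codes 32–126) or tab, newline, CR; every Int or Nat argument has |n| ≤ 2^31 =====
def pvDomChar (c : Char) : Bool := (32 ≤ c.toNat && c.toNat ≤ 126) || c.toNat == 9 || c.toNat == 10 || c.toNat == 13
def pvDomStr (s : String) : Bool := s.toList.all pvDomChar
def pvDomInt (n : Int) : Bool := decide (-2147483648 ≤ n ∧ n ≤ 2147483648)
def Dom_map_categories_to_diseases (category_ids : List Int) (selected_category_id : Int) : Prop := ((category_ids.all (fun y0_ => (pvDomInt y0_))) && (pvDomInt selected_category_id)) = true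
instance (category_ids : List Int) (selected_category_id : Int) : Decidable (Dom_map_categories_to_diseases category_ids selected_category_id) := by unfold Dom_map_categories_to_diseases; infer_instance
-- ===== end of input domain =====

-- B replaces A's filter-then-map comprehensions with a count of matches plus replication of the one looked-up name (objective: simpler).


-- ===== PORT A =====
-- the literal dict from A (shared constant; both Pythons write the same literal)
def pvDiseaseMap : PySem.Dict Int String :=
  PySem.Dict.ofList [(0, "Healthy Tooth"), (1, "Cavity"), (2, "Fillings"),
                     (3, "Impacted Tooth"), (4, "Implant"), (5, "Infected-teeth")]

def map_categories_to_diseases (category_ids : List Int) (selected_category_id : Int) : List String :=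
  -- int(cat) on an Int is the identity
  let filtered_ids := category_ids.filter (fun cat => cat == selected_category_id)
  let diseases := filtered_ids.map (fun cat => pvDiseaseMap.getD cat "Unknown")
  diseases

-- ===== PORT B =====
def map_categories_to_diseases_alt (category_ids : List Int) (selected_category_id : Int) : List String :=
  let count := PySem.List.count category_ids selected_category_id
  List.replicate count (pvDiseaseMap.getD selected_category_id "Unknown")

-- ===== PRECONDITION & SPEC =====
def Spec_map_categories_to_diseases (category_ids : List Int) (selected_category_id : Int) (out : List String) : Prop := out = map_categories_to_diseases_alt category_ids selected_category_id
instance (category_ids : List Int) (selected_category_id : Int) (out : List String) : Decidable (Spec_map_categories_to_diseases category_ids selected_category_id out) := by unfold Spec_map_categories_to_diseases; infer_instance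

-- ===== CLAIM (what is proved, stated in full; the proofs are below) =====
def Claim_equal_map_categories_to_diseases : Prop := ∀ (category_ids : List Int) (selected_category_id : Int), Dom_map_categories_to_diseases category_ids selected_category_id → Spec_map_categories_to_diseases category_ids selected_category_id (map_categories_to_diseases category_ids selected_category_id)

-- ===== LEMMAS AND PROOFS =====
-- every element of A's filtered list equals selected_category_id, so the mapped
-- names are all the same name: the list is a replicate of the count of matches
theorem pv_filter_map_eq_replicate (xs : List Int) (s : Int) :
    (xs.filter (fun cat => cat == s)).map (fun cat => pvDiseaseMap.getD cat "Unknown")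
      = List.replicate (PySem.List.count xs s) (pvDiseaseMap.getD s "Unknown") := by
  induction xs with
  | nil => simp [PySem.List.count]
  | cons x xs ih =>
    by_cases h : x = s
    · subst h
      simp [PySem.List.count, List.replicate_succ, ih]
    · simp [PySem.List.count, h, ih]

-- ===== VERDICT (by name: the statement is the Claim_ definition above) =====
theorem map_categories_to_diseases_spec : Claim_equal_map_categories_to_diseases := by
  intro xs s _
  unfold Spec_map_categories_to_diseases map_categories_to_diseases map_categories_to_diseases_alt
  exact pv_filter_map_eq_replicate xs s
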